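-- pv_equiv track=rewrite | github.com/Ihkali/AlphaZero | SL/clean_csv.py | split_san
-- ===== SOURCE A (Python) =====
-- def split_san(an: str) -> list[str]:
--     tokens = an.split()
--     moves = []
--     for tok in tokens:
--         if tok.endswith("."):
--             continue
--         if "." in tok:
--             parts = tok.split(".")
--             candidate = parts[-1].strip()
--             if candidate:
--                 moves.append(candidate)
--         else:
--             moves.append(tok)
--     return moves
-- ===== SOURCE B (Python) =====
-- def split_san(an: str) -> list[str]:
--     # one char-level pass: collect maximal runs of non-space/non-dot chars;
--     # a '.' resets the current run, whitespace (or end) emits it if non-empty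
--     moves = []
--     cur = []
--     for c in an:
--         if c.isspace():
--             if cur:
--                 moves.append("".join(cur))
--             cur = []
--         elif c == ".":
--             cur = []
--         else:
--             cur.append(c)
--     if cur:
--         moves.append("".join(cur))
--     return moves
-- ===== Notes on version B (the rewrite author's own statement) =====
-- stated objective: alternative
-- what changed: Replaced split()/per-token endswith-contains-resplit processing by one char-level scan that builds maximal runs of non-space, non-dot characters, resetting the current run at each dot and emitting it at whitespace or at the end.
import Mathlib
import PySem

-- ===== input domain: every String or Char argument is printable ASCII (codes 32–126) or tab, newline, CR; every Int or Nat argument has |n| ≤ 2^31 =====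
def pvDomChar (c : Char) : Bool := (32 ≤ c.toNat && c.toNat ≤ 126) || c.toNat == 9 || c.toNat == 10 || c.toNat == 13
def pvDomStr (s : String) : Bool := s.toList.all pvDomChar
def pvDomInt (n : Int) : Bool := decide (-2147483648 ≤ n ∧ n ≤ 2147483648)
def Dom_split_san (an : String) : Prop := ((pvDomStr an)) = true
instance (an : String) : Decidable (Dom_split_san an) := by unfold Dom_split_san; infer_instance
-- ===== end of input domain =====

-- B replaces A's split()/per-token endswith-contains-resplit processing by a single
-- char-level scan with a current-run accumulator; objective: alternative (same O(n) cost).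

-- ===== PORT A =====
-- literal port of A: split on whitespace, then per token: skip it if it ends with '.',
-- else if it contains '.' take the part after the last '.', strip it, keep it if non-empty.
def aStep (moves : List String) (tok : String) : List String :=
  if PySem.Str.endswith tok "." then moves
  else if PySem.Str.isIn "." tok then
    let parts := (PySem.Str.split? tok ".").getD []   -- sep "." ≠ "" so split? is always some
    let candidate := PySem.Str.strip (PySem.List.pyGetD parts (-1) "")   -- parts is always non-empty
    if candidate ≠ "" then moves ++ [candidate] else moves
  else moves ++ [tok]

def split_san (an : String) : List String :=
  (PySem.Str.split₀ an).foldl aStep []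

-- ===== PORT B =====
-- literal port of Source B: one pass over the characters with state (moves, cur)
def bStep (st : List String × List Char) (c : Char) : List String × List Char :=
  if PySem.Chars.isspace c then
    (if st.2 ≠ [] then st.1 ++ [String.ofList st.2] else st.1, [])
  else if c = '.' then (st.1, [])
  else (st.1, st.2 ++ [c])

def bFinish (st : List String × List Char) : List String :=
  if st.2 ≠ [] then st.1 ++ [String.ofList st.2] else st.1

def split_san_alt (an : String) : List String :=
  bFinish (an.toList.foldl bStep ([], []))

-- ===== PRECONDITION & SPEC =====
def Spec_split_san (an : String) (out : List String) : Prop := out = split_san_alt an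
instance (an : String) (out : List String) : Decidable (Spec_split_san an out) := by unfold Spec_split_san; infer_instance

-- ===== CLAIM (what is proved, stated in full; the proofs are below) =====
def Claim_equal_split_san : Prop := ∀ (an : String), Dom_split_san an → Spec_split_san an (split_san an)

-- ===== LEMMAS AND PROOFS =====

-- the suffix of t after its last '.'
def afterDot (t : List Char) : List Char := (t.reverse.takeWhile (· ≠ '.')).reverse

-- canonical whitespace word-splitter, accumulating the current word in order
def words (s : List Char) (t : List Char) : List (List Char) :=
  match s with
  | [] => if t = [] then [] else [t]
  | c :: s' =>
    if PySem.Chars.isspace c then (if t = [] then words s' [] else t :: words s' [])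
    else words s' (t ++ [c])

-- the common specification both ports are reduced to: per token, the part of it
-- after its last '.', kept when non-empty
def proc (t : List Char) : List (List Char) :=
  if afterDot t = [] then [] else [afterDot t]

def wsFree (t : List Char) : Prop := ∀ c ∈ t, PySem.Chars.isspace c = false

theorem afterDot_append_dot (t : List Char) : afterDot (t ++ ['.']) = [] := by
  simp [afterDot]

theorem afterDot_append_ne (t : List Char) (c : Char) (hc : c ≠ '.') :
    afterDot (t ++ [c]) = afterDot t ++ [c] := by
  simp [afterDot, hc]

theorem mem_afterDot {t : List Char} {c : Char} (h : c ∈ afterDot t) : c ∈ t := by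
  simp only [afterDot, List.mem_reverse] at h
  exact List.mem_reverse.mp ((List.takeWhile_sublist _).mem h)

theorem afterDot_eq_nil_iff (t : List Char) : afterDot t = [] ↔ t = [] ∨ ['.'] <:+ t := by
  induction t using List.reverseRecOn with
  | nil => simp [afterDot]
  | append_singleton ts c ih =>
    by_cases hc : c = '.'
    · subst hc; simp [afterDot]
    · rw [afterDot_append_ne ts c hc]
      constructor
      · intro h; simp at h
      · rintro (h | ⟨pre, hpre⟩)
        · simp at h
        · exfalso; have := congrArg List.getLast? hpre; simp at this; exact hc this.symm

theorem afterDot_of_not_mem {t : List Char} (h : '.' ∉ t) : afterDot t = t := by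
  simp only [afterDot]
  rw [List.takeWhile_eq_self_iff.mpr]
  · simp
  · intro c hc; simp; exact fun e => h (e ▸ List.mem_reverse.mp hc)

theorem afterDot_cons (c : Char) (l : List Char) :
    afterDot (c :: l) = if '.' ∈ l then afterDot l else if c = '.' then l else c :: l := by
  induction l using List.reverseRecOn with
  | nil =>
    by_cases hc : c = '.' <;> simp [afterDot, hc]
  | append_singleton ts d ih =>
    by_cases hd : d = '.'
    · subst hd
      have h1 : afterDot ((c :: ts) ++ ['.']) = [] := by simp [afterDot]
      have h2 : afterDot (ts ++ ['.']) = [] := by simp [afterDot]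
      simp only [List.cons_append] at h1
      simp [h1, h2]
    · have hd' : ¬ '.' = d := fun e => hd e.symm
      rw [show c :: (ts ++ [d]) = (c :: ts) ++ [d] from rfl,
          afterDot_append_ne _ d hd, afterDot_append_ne ts d hd, ih]
      by_cases hm : '.' ∈ ts <;> by_cases hc : c = '.' <;> simp [hm, hc, hd']

theorem strip_of_wsFree {l : List Char} (h : ∀ c ∈ l, PySem.Chars.isspace c = false) :
    PySem.Chars.strip l = l := by
  have hl : ∀ (m : List Char), (∀ c ∈ m, PySem.Chars.isspace c = false) →
      List.dropWhile PySem.Chars.isspace m = m := by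
    intro m hm
    cases m with
    | nil => rfl
    | cons a m' => simp [hm a (by simp)]
  simp [PySem.Chars.strip, PySem.Chars.lstrip, PySem.Chars.rstrip, hl l h,
    hl l.reverse (fun c hc => h c (List.mem_reverse.mp hc))]

theorem splitOn_go_last (fuel : Nat) (l cur : List Char) (acc : List (List Char))
    (h : l.length ≤ fuel) :
    (PySem.Chars.splitOn.go ['.'] fuel l cur acc).getLast?
      = some (if '.' ∈ l then afterDot l else cur.reverse ++ l) := by
  induction fuel generalizing l cur acc with
  | zero =>
    have : l = [] := List.eq_nil_of_length_eq_zero (Nat.le_zero.mp h)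
    subst this
    simp [PySem.Chars.splitOn.go]
  | succ fuel ih =>
    cases l with
    | nil => simp [PySem.Chars.splitOn.go]
    | cons c rest =>
      rw [PySem.Chars.splitOn.go]
      by_cases hc : c = '.'
      · subst hc
        have hpre : (['.'] : List Char).isPrefixOf ('.' :: rest) = true := by simp [List.isPrefixOf]
        rw [if_pos hpre]
        rw [ih _ _ _ (by simpa using Nat.le_of_succ_le_succ h)]
        simp [afterDot_cons]
      · have hpre : (['.'] : List Char).isPrefixOf (c :: rest) = false := by
          simp [List.isPrefixOf]; exact fun e => hc e.symm
        rw [if_neg (by simp [hpre])]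
        rw [ih _ _ _ (by simpa using Nat.le_of_succ_le_succ h)]
        rw [afterDot_cons]
        have hmem : ('.' ∈ c :: rest) ↔ '.' ∈ rest := by simp; exact fun e => absurd e.symm hc
        split_ifs with h1 h2 <;> simp_all

theorem splitOn_last (t : List Char) (h : '.' ∈ t) :
    (PySem.Chars.splitOn t ['.']).getLast? = some (afterDot t) := by
  rw [PySem.Chars.splitOn, splitOn_go_last _ _ _ _ (by omega), if_pos h]

theorem go_words (s cur : List Char) (acc : List (List Char)) :
    PySem.Chars.split₀.go s cur acc = acc.reverse ++ words s cur.reverse := by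
  induction s generalizing cur acc with
  | nil => rw [PySem.Chars.split₀.go]; rw [words]; split_ifs <;> simp_all
  | cons c s' ih =>
    rw [PySem.Chars.split₀.go, words]
    by_cases hsp : PySem.Chars.isspace c
    · rw [if_pos hsp, if_pos hsp]
      by_cases hcur : cur = []
      · subst hcur; simp [ih]
      · rw [if_neg (by simpa using hcur), if_neg (by simpa using hcur), ih]
        simp
    · rw [if_neg hsp, if_neg hsp, ih]
      simp

theorem mem_words {s t0 t : List Char} (h : t ∈ words s t0) (h0 : wsFree t0) :
    t ≠ [] ∧ wsFree t := by
  induction s generalizing t0 with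
  | nil =>
    rw [words] at h
    split_ifs at h with h1
    · simp at h
    · simp at h; subst h; exact ⟨h1, h0⟩
  | cons c s' ih =>
    rw [words] at h
    split_ifs at h with hsp h1
    · exact ih h (by intro x hx; cases hx)
    · rcases List.mem_cons.mp h with rfl | h
      · exact ⟨h1, h0⟩
      · exact ih h (by intro x hx; cases hx)
    · refine ih h ?_
      intro x hx
      rcases List.mem_append.mp hx with hx | hx
      · exact h0 x hx
      · simp at hx; subst hx; simpa using hsp

theorem aStep_eq {t : List Char} (hne : t ≠ []) (hws : wsFree t) (moves : List String) :
    aStep moves (String.ofList t) = moves ++ (proc t).map String.ofList := by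
  have hends : PySem.Str.endswith (String.ofList t) "." = PySem.Chars.endswith t ['.'] := by
    simp [PySem.Str.endswith]
  by_cases had : afterDot t = []
  · have hsuf : ['.'] <:+ t := by
      rcases (afterDot_eq_nil_iff t).mp had with h | h
      · exact absurd h hne
      · exact h
    rw [aStep, hends, if_pos ((PySem.Chars.endswith_iff t ['.']).mpr hsuf)]
    simp [proc, had]
  · have hnsuf : PySem.Chars.endswith t ['.'] = false := by
      rw [Bool.eq_false_iff]
      intro hcon
      exact had ((afterDot_eq_nil_iff t).mpr (Or.inr ((PySem.Chars.endswith_iff t ['.']).mp hcon)))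
    rw [aStep, hends, hnsuf]
    simp only [Bool.false_eq_true, if_false]
    have hisin : PySem.Str.isIn "." (String.ofList t) = PySem.Chars.isIn ['.'] t := by
      simp [PySem.Str.isIn]
    by_cases hdot : '.' ∈ t
    · rw [hisin, if_pos ((PySem.Chars.isIn_iff_infix _ _).mpr ((List.singleton_infix_iff _ _).mpr hdot))]
      have hsplit : (PySem.Str.split? (String.ofList t) ".").getD []
          = (PySem.Chars.splitOn t ['.']).map String.ofList := by
        simp [PySem.Str.split?, PySem.Chars.split?]
      have hlast : PySem.List.pyGetD ((PySem.Chars.splitOn t ['.']).map String.ofList) (-1) ""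
          = String.ofList (afterDot t) := by
        rw [PySem.List.pyGetD, PySem.List.pyGet?_neg_one, List.getLast?_map, splitOn_last t hdot]
        rfl
      have hwsa : ∀ c ∈ afterDot t, PySem.Chars.isspace c = false :=
        fun c hc => hws c (mem_afterDot hc)
      have hstrip : PySem.Str.strip (String.ofList (afterDot t))
          = String.ofList (afterDot t) := by
        simp [PySem.Str.strip, strip_of_wsFree hwsa]
      simp only [hsplit, hlast, hstrip]
      rw [if_pos]
      · simp [proc, had]
      · intro e
        exact had (by simpa using congrArg String.toList e)
    · have hni : PySem.Chars.isIn ['.'] t = false := by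
        rw [Bool.eq_false_iff]
        intro hcon
        exact hdot ((List.singleton_infix_iff _ _).mp ((PySem.Chars.isIn_iff_infix _ _).mp hcon))
      rw [hisin, hni]
      simp only [Bool.false_eq_true, if_false]
      rw [afterDot_of_not_mem hdot] at had
      simp [proc, afterDot_of_not_mem hdot, had]

theorem foldl_aStep (ts : List (List Char)) (moves : List String)
    (h : ∀ t ∈ ts, t ≠ [] ∧ wsFree t) :
    (ts.map String.ofList).foldl aStep moves
      = moves ++ (ts.flatMap proc).map String.ofList := by
  induction ts generalizing moves with
  | nil => simp
  | cons t ts ih =>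
    obtain ⟨hne, hws⟩ := h t (by simp)
    simp only [List.map_cons, List.foldl_cons, aStep_eq hne hws,
      List.flatMap_cons, List.map_append]
    rw [ih _ (fun x hx => h x (by simp [hx]))]
    simp

theorem B_main (s : List Char) (tA : List Char) (moves : List String) (h : wsFree tA) :
    bFinish (s.foldl bStep (moves, afterDot tA))
      = moves ++ ((words s tA).flatMap proc).map String.ofList := by
  induction s generalizing tA moves with
  | nil =>
    rw [words]
    by_cases htA : tA = []
    · subst htA; simp [bFinish, afterDot]
    · simp only [if_neg htA, List.flatMap_cons, List.flatMap_nil, List.append_nil]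
      rw [bFinish, proc]
      by_cases had : afterDot tA = [] <;> simp [had]
  | cons c s' ih =>
    rw [List.foldl_cons, words]
    by_cases hsp : PySem.Chars.isspace c
    · have hstep : bStep (moves, afterDot tA) c
          = (if afterDot tA ≠ [] then moves ++ [String.ofList (afterDot tA)] else moves, []) := by
        simp [bStep, hsp]
      rw [if_pos hsp, hstep]
      by_cases htA : tA = []
      · subst htA
        have h0 : afterDot ([] : List Char) = [] := rfl
        have := ih [] moves (by intro x hx; cases hx)
        rw [h0] at this
        simpa [h0] using this
      · rw [if_neg htA]
        by_cases had : afterDot tA = []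
        · rw [if_neg (by simpa using had)]
          have := ih [] moves (by intro x hx; cases hx)
          rw [show afterDot ([] : List Char) = [] from rfl] at this
          rw [this]
          simp [proc, had]
        · rw [if_pos had]
          have := ih [] (moves ++ [String.ofList (afterDot tA)]) (by intro x hx; cases hx)
          rw [show afterDot ([] : List Char) = [] from rfl] at this
          rw [this]
          simp [proc, had]
    · rw [if_neg hsp]
      by_cases hc : c = '.'
      · subst hc
        have hstep : bStep (moves, afterDot tA) '.' = (moves, []) := by
          simp [bStep, hsp]
        rw [hstep]
        have := ih (tA ++ ['.']) moves (by
          intro x hx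
          rcases List.mem_append.mp hx with hx | hx
          · exact h x hx
          · simp at hx; subst hx; simpa using hsp)
        rw [afterDot_append_dot] at this
        exact this
      · have hstep : bStep (moves, afterDot tA) c = (moves, afterDot tA ++ [c]) := by
          simp [bStep, hsp, hc]
        rw [hstep, ← afterDot_append_ne tA c hc]
        exact ih (tA ++ [c]) moves (by
          intro x hx
          rcases List.mem_append.mp hx with hx | hx
          · exact h x hx
          · simp at hx; subst hx; simpa using hsp)

-- ===== VERDICT (by name: the statement is the Claim_ definition above) =====
theorem split_san_spec : Claim_equal_split_san := by
  intro an _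
  unfold Spec_split_san split_san split_san_alt
  have hA : PySem.Str.split₀ an = (words an.toList []).map String.ofList := by
    show (PySem.Chars.split₀ an.toList).map String.ofList = _
    unfold PySem.Chars.split₀
    rw [go_words]
    rfl
  rw [hA, foldl_aStep _ _ (fun t ht => mem_words ht (by intro c hc; cases hc))]
  have hB := B_main an.toList [] [] (by intro c hc; cases hc)
  simpa [afterDot] using hB.symm
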